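-- pv_equiv track=rewrite | github.com/wherby/code | algorithm/dp/剪枝DP-长条棍子边矩形.py | allCombination
-- ===== SOURCE A (Python) =====
-- def allCombination(ls,N):
--     S = {tuple()}
--
--     for x in ls:
--         T = set()
--         for a_tuple in S:
--             a_list = list(a_tuple)
--             for j in range(len(a_list)):
--                 b_list = list(a_list)
--                 b_list[j] += x
--                 b_list.sort()
--
--                 if  b_list[-1]*len(b_list)<=N:
--                     T.add(tuple(b_list))
--             a_list.append(x)
--             a_list.sort()
--             if  a_list[-1]*len(a_list)<=N:
--                 T.add(tuple(a_list))
--         S = T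
--     return S
-- ===== SOURCE B (Python) =====
-- def allCombination(ls, N):
--     # Recursive DFS over the items: each item either joins one of the existing
--     # groups or starts a new group; prune a branch as soon as the (sorted)
--     # group tuple violates max(g)*len(g) <= N.  Complete assignments reaching
--     # the end of ls are collected into the result set.
--     res = set()
--
--     def fits(g):
--         return g[-1] * len(g) <= N
--
--     def rec(i, groups):
--         if i == len(ls):
--             res.add(groups)
--             return
--         x = ls[i]
--         for j in range(len(groups)):
--             ng = tuple(sorted(groups[:j] + (groups[j] + x,) + groups[j + 1:]))
--             if fits(ng):
--                 rec(i + 1, ng)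
--         ng = tuple(sorted(groups + (x,)))
--         if fits(ng):
--             rec(i + 1, ng)
--
--     rec(0, ())
--     return res
-- ===== Notes on version B (the rewrite author's own statement) =====
-- stated objective: alternative
-- what changed: A builds the whole set of group-tuples level by level (a breadth-first fold that rebuilds a fresh set after each item); B is a recursive depth-first search over the items that, at each item, branches on which existing group receives it or whether it starts a new group, prunes with max(g)*len(g) <= N at each step, and collects complete assignments at the leaves.
import Mathlib
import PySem

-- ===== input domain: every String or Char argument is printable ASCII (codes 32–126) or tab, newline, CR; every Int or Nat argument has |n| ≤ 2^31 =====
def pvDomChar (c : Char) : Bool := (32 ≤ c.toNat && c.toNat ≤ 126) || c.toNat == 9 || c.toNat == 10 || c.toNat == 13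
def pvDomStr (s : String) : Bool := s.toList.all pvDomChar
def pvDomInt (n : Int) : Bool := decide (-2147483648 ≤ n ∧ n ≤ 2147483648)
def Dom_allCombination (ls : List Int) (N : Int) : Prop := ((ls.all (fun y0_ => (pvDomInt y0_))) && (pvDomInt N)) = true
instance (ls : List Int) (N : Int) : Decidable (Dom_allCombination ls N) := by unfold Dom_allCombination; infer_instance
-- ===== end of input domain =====

-- B replaces A's level-by-level breadth-first set construction by a recursive depth-first
-- choice-tree over the items (objective: alternative decomposition, same pruned result set).


-- ===== PORT A =====
-- literal port of A: S starts as {()}; for each x, build T from every tuple of S by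
-- bumping each position j (copy, +=x, sort) and by appending x (sort), pruning with
-- b[-1]*len(b) <= N.  (b[-1] is ported as pyGetD b (-1) 0: every candidate is nonempty,
-- so Python never raises here and the default is never used.)
def allCombination (ls : List Int) (N : Int) : List (List Int) :=
  ls.foldl
    (fun S x =>
      S.foldl
        (fun T aTuple =>
          let aList := aTuple
          let T1 := (List.range aList.length).foldl
            (fun T (j : Nat) =>
              let bList := PySem.List.sorted
                (PySem.List.pySetD aList (j : Int) (PySem.List.pyGetD aList (j : Int) 0 + x))
                (fun v => v) false
              if PySem.List.pyGetD bList (-1) 0 * (bList.length : Int) ≤ N then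
                PySem.Set.add T bList
              else T)
            T
          let aList2 := PySem.List.sorted (aList ++ [x]) (fun v => v) false
          if PySem.List.pyGetD aList2 (-1) 0 * (aList2.length : Int) ≤ N then
            PySem.Set.add T1 aList2
          else T1)
        PySem.Set.empty)
    [[]]

-- ===== PORT B =====
-- literal port of Source B: fits(g) = g[-1]*len(g) <= N
def pvFitsB (N : Int) (g : List Int) : Bool :=
  decide (PySem.List.pyGetD g (-1) 0 * (g.length : Int) ≤ N)

-- rec(i, groups): the remaining suffix ls[i:] is carried as a list; res is threaded
def pvRecB (N : Int) : List Int → List Int → PySem.Set (List Int) → PySem.Set (List Int)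
  | [], groups, res => PySem.Set.add res groups
  | x :: rest, groups, res =>
    let res1 := (List.range groups.length).foldl
      (fun r (j : Nat) =>
        let ng := PySem.List.sorted
          (PySem.List.slice groups none (some (j : Int)) ++
            [PySem.List.pyGetD groups (j : Int) 0 + x] ++
            PySem.List.slice groups (some ((j : Int) + 1)) none)
          (fun v => v) false
        if pvFitsB N ng then pvRecB N rest ng r else r)
      res
    let ng := PySem.List.sorted (groups ++ [x]) (fun v => v) false
    if pvFitsB N ng then pvRecB N rest ng res1 else res1

def allCombination_alt (ls : List Int) (N : Int) : List (List Int) :=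
  pvRecB N ls [] PySem.Set.empty

-- ===== PRECONDITION & SPEC =====
def Spec_allCombination (ls : List Int) (N : Int) (out : List (List Int)) : Prop := out = allCombination_alt ls N
instance (ls : List Int) (N : Int) (out : List (List Int)) : Decidable (Spec_allCombination ls N out) := by unfold Spec_allCombination; infer_instance

-- ===== CLAIM (what is proved, stated in full; the proofs are below) =====
def Claim_equal_allCombination : Prop := ∀ (ls : List Int) (N : Int), Dom_allCombination ls N → Spec_allCombination ls N (allCombination ls N)

-- ===== LEMMAS AND PROOFS =====

-- the candidate obtained by bumping position j of t by x, re-sorted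
def pvCand (x : Int) (t : List Int) (j : Nat) : List Int :=
  PySem.List.sorted (t.set j (PySem.List.pyGetD t (j : Int) 0 + x)) (fun v => v) false

-- all surviving children of a tuple t for item x, in generation order
def pvChildren (N x : Int) (t : List Int) : List (List Int) :=
  (((List.range t.length).map (pvCand x t)) ++
    [PySem.List.sorted (t ++ [x]) (fun v => v) false]).filter (pvFitsB N)

-- leaves of the choice tree rooted at t over the remaining items
def pvLeaves (N : Int) : List Int → List Int → List (List Int)
  | [], t => [t]
  | x :: rest, t => (pvChildren N x t).flatMap (pvLeaves N rest)

-- generic: a fold that conditionally updates by g (c b) is one update by the filtered flatMap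
theorem pv_foldl_if_update {β γ' : Type} (xs : List β) (c : β → γ') (p : γ' → Bool)
    (g : γ' → List (List Int)) (r0 : PySem.Set (List Int)) :
    xs.foldl (fun r b => if p (c b) then PySem.Set.update r (g (c b)) else r) r0
      = PySem.Set.update r0 (((xs.map c).filter p).flatMap g) := by
  induction xs generalizing r0 with
  | nil => rfl
  | cons b xs ih =>
    simp only [List.foldl_cons, List.map_cons, List.filter_cons]
    cases h : p (c b) with
    | false => simp [ih]
    | true =>
      simp only [if_true, ih, List.flatMap_cons]
      rw [PySem.Set.update_append]

-- generic: folding update over S is one update by the flatMap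
theorem pv_foldl_update {α : Type} (S : List α) (ch : α → List (List Int))
    (T0 : PySem.Set (List Int)) :
    S.foldl (fun T t => PySem.Set.update T (ch t)) T0
      = PySem.Set.update T0 (S.flatMap ch) := by
  induction S generalizing T0 with
  | nil => rfl
  | cons t S ih => simp only [List.foldl_cons, List.flatMap_cons, ih, PySem.Set.update_append]

-- update by a list of already-present elements is the identity
theorem pv_update_of_subset (r : PySem.Set (List Int)) (m : List (List Int))
    (h : ∀ y ∈ m, y ∈ r) : PySem.Set.update r m = r := by
  rw [PySem.Set.update_eq_append_filter]
  have : (PySem.Set.ofList m).filter (fun y => !(PySem.Set.contains r y)) = [] := by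
    rw [List.filter_eq_nil_iff]
    intro y hy
    have hyr : y ∈ r := h y ((PySem.Set.mem_ofList m y).mp hy)
    simpa using hyr
  rw [this, List.append_nil]

-- KEY: duplicated parents contribute nothing new — flatMap may be taken over the
-- deduplicated tail of the parents
theorem pv_update_dedup (f : List Int → List (List Int)) :
    ∀ (L : List (List Int)) (s r : PySem.Set (List Int)),
      (∀ a ∈ s, ∀ y ∈ f a, y ∈ r) →
      PySem.Set.update r (L.flatMap f)
        = PySem.Set.update r (((PySem.Set.update s L).drop s.length).flatMap f) := by
  intro L
  induction L with
  | nil => intro s r _; simp [PySem.Set.update_nil, List.drop_length]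
  | cons a L ih =>
    intro s r hs
    by_cases ha : a ∈ s
    · have h1 : PySem.Set.update s (a :: L) = PySem.Set.update s L := by
        rw [PySem.Set.update_cons, PySem.Set.add_of_mem ha]
      have h2 : PySem.Set.update r (f a) = r :=
        pv_update_of_subset r (f a) (fun y hy => hs a ha y hy)
      rw [h1, List.flatMap_cons, PySem.Set.update_append, h2, ih s r hs]
    · have h1 : PySem.Set.update s (a :: L) = PySem.Set.update (s ++ [a]) L := by
        rw [PySem.Set.update_cons, PySem.Set.add_of_not_mem ha]
      have hdrop : (PySem.Set.update (s ++ [a]) L).drop s.length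
          = a :: (PySem.Set.update (s ++ [a]) L).drop (s ++ [a]).length := by
        rw [PySem.Set.update_eq_append_filter]
        rw [List.append_assoc]
        rw [List.drop_left]
        simp
      have hsub : ∀ b ∈ s ++ [a], ∀ y ∈ f b, y ∈ PySem.Set.update r (f a) := by
        intro b hb y hy
        rcases List.mem_append.mp hb with hb | hb
        · exact (PySem.Set.mem_update _ _ _).mpr (Or.inl (hs b hb y hy))
        · simp only [List.mem_singleton] at hb
          subst hb
          exact (PySem.Set.mem_update _ _ _).mpr (Or.inr hy)
      rw [h1, hdrop, List.flatMap_cons, PySem.Set.update_append,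
        ih (s ++ [a]) (PySem.Set.update r (f a)) hsub, List.flatMap_cons,
        PySem.Set.update_append]

-- generic: a fold that conditionally adds c b is one update by the filtered map
theorem pv_foldl_if_add {β : Type} (xs : List β) (c : β → List Int) (p : List Int → Bool)
    (r0 : PySem.Set (List Int)) :
    xs.foldl (fun r b => if p (c b) then PySem.Set.add r (c b) else r) r0
      = PySem.Set.update r0 ((xs.map c).filter p) := by
  induction xs generalizing r0 with
  | nil => rfl
  | cons b xs ih =>
    simp only [List.foldl_cons, List.map_cons, List.filter_cons]
    cases h : p (c b) with
    | false => simp [ih]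
    | true => simp only [if_true, ih, PySem.Set.update_cons]

-- A's per-tuple body is one update by pvChildren
theorem pv_stepA_eq (N x : Int) :
    (fun (T : PySem.Set (List Int)) (aTuple : List Int) =>
      let aList := aTuple
      let T1 := (List.range aList.length).foldl
        (fun T (j : Nat) =>
          let bList := PySem.List.sorted
            (PySem.List.pySetD aList (j : Int) (PySem.List.pyGetD aList (j : Int) 0 + x))
            (fun v => v) false
          if PySem.List.pyGetD bList (-1) 0 * (bList.length : Int) ≤ N then
            PySem.Set.add T bList
          else T)
        T
      let aList2 := PySem.List.sorted (aList ++ [x]) (fun v => v) false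
      if PySem.List.pyGetD aList2 (-1) 0 * (aList2.length : Int) ≤ N then
        PySem.Set.add T1 aList2
      else T1)
      = fun T t => PySem.Set.update T (pvChildren N x t) := by
  funext T t
  dsimp only
  have hok : ∀ g : List Int,
      (PySem.List.pyGetD g (-1) 0 * (g.length : Int) ≤ N) = (pvFitsB N g = true) := by
    intro g; simp [pvFitsB]
  simp only [hok]
  rw [pv_foldl_if_add (List.range t.length)
    (fun j => PySem.List.sorted
      (PySem.List.pySetD t (j : Int) (PySem.List.pyGetD t (j : Int) 0 + x))
      (fun v => v) false) (pvFitsB N) T]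
  simp only [PySem.List.pySetD_natCast]
  unfold pvChildren pvCand
  rw [List.filter_append, PySem.Set.update_append]
  cases h : pvFitsB N (PySem.List.sorted (t ++ [x]) (fun v => v) false) with
  | false => simp [h, PySem.Set.update_nil]
  | true => simp [h, PySem.Set.update_cons, PySem.Set.update_nil]

-- B's recursion collects exactly the leaves
theorem pv_recB_eq (N : Int) : ∀ (rest t : List Int) (res : PySem.Set (List Int)),
    pvRecB N rest t res = PySem.Set.update res (pvLeaves N rest t) := by
  intro rest
  induction rest with
  | nil => intro t res; rfl
  | cons x rest ih =>
    intro t res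
    simp only [pvRecB]
    have hbody : ∀ (r : PySem.Set (List Int)), ∀ j ∈ List.range t.length,
        (let ng := PySem.List.sorted
            (PySem.List.slice t none (some (j : Int)) ++
              [PySem.List.pyGetD t (j : Int) 0 + x] ++
              PySem.List.slice t (some ((j : Int) + 1)) none)
            (fun v => v) false
         if pvFitsB N ng then pvRecB N rest ng r else r)
          = (if pvFitsB N (pvCand x t j) then
              PySem.Set.update r (pvLeaves N rest (pvCand x t j)) else r) := by
      intro r j hj
      have hj' : j < t.length := List.mem_range.mp hj
      have hcast : ((j : Int) + 1) = ((j + 1 : Nat) : Int) := by push_cast; ring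
      have hng : PySem.List.sorted
          (PySem.List.slice t none (some (j : Int)) ++
            [PySem.List.pyGetD t (j : Int) 0 + x] ++
            PySem.List.slice t (some ((j : Int) + 1)) none)
          (fun v => v) false = pvCand x t j := by
        rw [hcast, PySem.List.slice_to_natCast, PySem.List.slice_from_natCast]
        unfold pvCand
        rw [List.set_eq_take_cons_drop _ hj']
        simp
      dsimp only
      rw [hng, ih]
    rw [PySem.List.foldl_congr_mem _ _ _ res hbody]
    rw [pv_foldl_if_update (List.range t.length) (pvCand x t) (pvFitsB N)
      (pvLeaves N rest) res]
    simp only [ih]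
    show (if pvFitsB N (PySem.List.sorted (t ++ [x]) (fun v => v) false) then _ else _) = _
    have hleaves : pvLeaves N (x :: rest) t = (pvChildren N x t).flatMap (pvLeaves N rest) := rfl
    rw [hleaves]
    unfold pvChildren
    rw [List.filter_append, List.flatMap_append, PySem.Set.update_append]
    cases h : pvFitsB N (PySem.List.sorted (t ++ [x]) (fun v => v) false) with
    | false => simp [h, PySem.Set.update_nil]
    | true => simp [h]

-- the level fold over a seed list L computes the set of all leaves from L
theorem pv_levels (N : Int) : ∀ (ls : List Int) (L : List (List Int)),
    ls.foldl
        (fun S x =>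
          S.foldl
            (fun T aTuple =>
              let aList := aTuple
              let T1 := (List.range aList.length).foldl
                (fun T (j : Nat) =>
                  let bList := PySem.List.sorted
                    (PySem.List.pySetD aList (j : Int) (PySem.List.pyGetD aList (j : Int) 0 + x))
                    (fun v => v) false
                  if PySem.List.pyGetD bList (-1) 0 * (bList.length : Int) ≤ N then
                    PySem.Set.add T bList
                  else T)
                T
              let aList2 := PySem.List.sorted (aList ++ [x]) (fun v => v) false
              if PySem.List.pyGetD aList2 (-1) 0 * (aList2.length : Int) ≤ N then
                PySem.Set.add T1 aList2
              else T1)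
            PySem.Set.empty)
        (PySem.Set.ofList L)
      = PySem.Set.ofList (L.flatMap (pvLeaves N ls)) := by
  intro ls
  induction ls with
  | nil =>
    intro L
    simp only [List.foldl_nil]
    have : pvLeaves N [] = fun t => [t] := rfl
    rw [this, List.flatMap_singleton']
  | cons x ls ih =>
    intro L
    rw [List.foldl_cons, pv_stepA_eq N x, pv_foldl_update]
    have h1 : PySem.Set.update PySem.Set.empty ((PySem.Set.ofList L).flatMap (pvChildren N x))
        = PySem.Set.ofList (L.flatMap (pvChildren N x)) := by
      have hk := pv_update_dedup (pvChildren N x) L PySem.Set.empty PySem.Set.empty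
        (by intro a ha; simp [PySem.Set.empty] at ha)
      unfold PySem.Set.empty at hk ⊢
      rw [PySem.Set.update_nil_left, PySem.Set.update_nil_left,
        List.length_nil, List.drop_zero, PySem.Set.update_nil_left] at hk
      rw [PySem.Set.update_nil_left]
      exact hk.symm
    rw [h1, ih]
    simp only [pvLeaves]
    rw [List.flatMap_assoc]

-- ===== VERDICT (by name: the statement is the Claim_ definition above) =====
theorem allCombination_spec : Claim_equal_allCombination := by
  intro ls N _
  unfold Spec_allCombination allCombination allCombination_alt
  rw [pv_recB_eq]
  have h0 : ([[]] : List (List Int)) = PySem.Set.ofList [[]] := by decide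
  rw [h0, pv_levels]
  simp [PySem.Set.update_nil_left]
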